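-- pv_equiv track=rewrite | github.com/khaibnd/Flowshop-GA | metaheuristicas.py | mapear
-- ===== SOURCE A (Python) =====
-- def mapear(protochild, lista_m, pos_inicial, pos_final):
--     for i in range(len(protochild)):
--         if (i < pos_inicial) or (i > pos_final):
--             for j in range(len(lista_m)):
--                 if protochild[i] in lista_m[j]:
--                     if protochild[i] == lista_m[j][0]:
--                         protochild[i] = lista_m[j][1]
--                     else:
--                         protochild[i] = lista_m[j][0]
--     return protochild
-- ===== SOURCE B (Python) =====
-- def mapear(protochild, lista_m, pos_inicial, pos_final):
--     # compose all mapping rows (right-to-left) into one lookup table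
--     mapping = {}
--     for row in reversed(lista_m):
--         news = []
--         for e in row:
--             t = row[1] if e == row[0] else row[0]
--             news.append((e, mapping.get(t, t)))
--         for e, w in news:
--             mapping[e] = w
--     return [v if pos_inicial <= i <= pos_final else mapping.get(v, v)
--             for i, v in enumerate(protochild)]
-- ===== Notes on version B (the rewrite author's own statement) =====
-- stated objective: faster
-- what changed: B composes all mapping rows into a single lookup dict in one backward pass over lista_m (each row only updates entries for its own elements via the already-composed suffix map), then maps each position by one O(1) dict lookup; A rescans the whole mapping list for every position.
-- outside the precondition, e.g. on mapear([7], [[3]], 1, 1): A returns [7], B raises IndexError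
import Mathlib
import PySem

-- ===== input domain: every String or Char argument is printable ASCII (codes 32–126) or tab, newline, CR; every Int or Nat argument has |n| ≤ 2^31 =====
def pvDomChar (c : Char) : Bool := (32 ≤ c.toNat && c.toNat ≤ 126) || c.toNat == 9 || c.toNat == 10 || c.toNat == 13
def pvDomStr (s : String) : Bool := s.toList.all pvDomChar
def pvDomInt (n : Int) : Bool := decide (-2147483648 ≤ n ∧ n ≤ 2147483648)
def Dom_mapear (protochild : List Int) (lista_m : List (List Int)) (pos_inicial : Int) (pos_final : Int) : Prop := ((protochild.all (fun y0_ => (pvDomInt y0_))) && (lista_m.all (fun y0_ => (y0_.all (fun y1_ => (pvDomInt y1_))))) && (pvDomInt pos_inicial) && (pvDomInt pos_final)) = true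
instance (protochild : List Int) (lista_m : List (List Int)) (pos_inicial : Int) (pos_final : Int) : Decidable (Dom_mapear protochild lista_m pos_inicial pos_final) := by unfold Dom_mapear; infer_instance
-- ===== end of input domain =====

-- B composes all mapping rows into one lookup dict in a single backward pass, then maps
-- each position by one O(1) lookup (A rescans lista_m for every position); equivalence is
-- about the RETURN value only (the Python A mutates protochild in place, B builds a fresh list).


-- ===== PORT A =====
-- literal port of A: outer loop over positions, inner loop over lista_m indices,
-- reading and in-place updating protochild[i] (pyGetD/pySetD are used only at
-- in-range indices on inputs admitted by Pre_).
def mapear (protochild : List Int) (lista_m : List (List Int)) (pos_inicial : Int) (pos_final : Int) : List Int :=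
  (PySem.List.pyRange 0 protochild.length 1).foldl (fun pc i =>
    if i < pos_inicial ∨ i > pos_final then
      (PySem.List.pyRange 0 lista_m.length 1).foldl (fun pc j =>
        let row := PySem.List.pyGetD lista_m j []
        if PySem.List.pyGetD pc i 0 ∈ row then
          if PySem.List.pyGetD pc i 0 = PySem.List.pyGetD row 0 0 then
            PySem.List.pySetD pc i (PySem.List.pyGetD row 1 0)
          else
            PySem.List.pySetD pc i (PySem.List.pyGetD row 0 0)
        else pc) pc
    else pc) protochild

-- ===== PORT B =====
-- literal port of Source B: one backward pass over lista_m composing the rows into one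
-- dict 'mapping', then a comprehension over enumerate(protochild).
def mapear_alt (protochild : List Int) (lista_m : List (List Int)) (pos_inicial : Int) (pos_final : Int) : List Int :=
  let mapping := lista_m.reverse.foldl (fun (mapping : PySem.Dict Int Int) row =>
    let news := row.foldl (fun (news : List (Int × Int)) e =>
      let t := if e = PySem.List.pyGetD row 0 0 then PySem.List.pyGetD row 1 0
               else PySem.List.pyGetD row 0 0
      news ++ [(e, mapping.getD t t)]) []
    news.foldl (fun (m : PySem.Dict Int Int) p => m.insert p.1 p.2) mapping) PySem.Dict.empty
  (PySem.List.enumerate protochild 0).map (fun p =>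
    if pos_inicial ≤ p.1 ∧ p.1 ≤ pos_final then p.2 else mapping.getD p.2 p.2)

-- ===== PRECONDITION & SPEC =====
-- Pre_ excludes inputs with a length-1 row in lista_m: A raises IndexError on row[1]
-- whenever such a row's element is hit, and B raises IndexError on every singleton row;
-- on a singleton row that is never matched A returns while B still raises.
def Pre_mapear (protochild : List Int) (lista_m : List (List Int)) (pos_inicial : Int) (pos_final : Int) : Prop :=
  ∀ row ∈ lista_m, row.length ≠ 1
instance (protochild : List Int) (lista_m : List (List Int)) (pos_inicial : Int) (pos_final : Int) : Decidable (Pre_mapear protochild lista_m pos_inicial pos_final) := by unfold Pre_mapear; infer_instance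

def pvWitness_mapear : List Int × List (List Int) × Int × Int := ([1, 2, 3], [[1, 2]], 1, 1)

def Spec_mapear (protochild : List Int) (lista_m : List (List Int)) (pos_inicial : Int) (pos_final : Int) (out : List Int) : Prop := out = mapear_alt protochild lista_m pos_inicial pos_final
instance (protochild : List Int) (lista_m : List (List Int)) (pos_inicial : Int) (pos_final : Int) (out : List Int) : Decidable (Spec_mapear protochild lista_m pos_inicial pos_final out) := by unfold Spec_mapear; infer_instance

-- ===== CLAIM (what is proved, stated in full; the proofs are below) =====
def Claim_equal_mapear : Prop := ∀ (protochild : List Int) (lista_m : List (List Int)) (pos_inicial : Int) (pos_final : Int), Dom_mapear protochild lista_m pos_inicial pos_final → Pre_mapear protochild lista_m pos_inicial pos_final → Spec_mapear protochild lista_m pos_inicial pos_final (mapear protochild lista_m pos_inicial pos_final)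

-- ===== LEMMAS AND PROOFS =====

-- the value a single mapping row sends w to (shared body of both inner loops)
def pvStep (w : Int) (row : List Int) : Int :=
  if w ∈ row then
    if w = PySem.List.pyGetD row 0 0 then PySem.List.pyGetD row 1 0
    else PySem.List.pyGetD row 0 0
  else w

-- the image of a value through all mapping rows
def pvImg (lm : List (List Int)) (v : Int) : Int := lm.foldl pvStep v

-- common specification: map each position, positions inside [pi, pf] untouched
def pvMap (pi pf : Int) (lm : List (List Int)) : List Int → Int → List Int
  | [], _ => []
  | v :: vs, i => (if i < pi ∨ pf < i then pvImg lm v else v) :: pvMap pi pf lm vs (i + 1)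

theorem pvMap_length (pi pf : Int) (lm : List (List Int)) (l : List Int) (i : Int) :
    (pvMap pi pf lm l i).length = l.length := by
  induction l generalizing i with
  | nil => rfl
  | cons v vs ih => simp [pvMap, ih]

theorem pvMap_getElem (pi pf : Int) (lm : List (List Int)) (l : List Int) (i : Int)
    (n : Nat) (hn : n < l.length) :
    (pvMap pi pf lm l i)[n]'(by rw [pvMap_length]; exact hn) =
      (if i + n < pi ∨ pf < i + n then pvImg lm l[n] else l[n]) := by
  induction l generalizing i n with
  | nil => simp at hn
  | cons v vs ih =>
    cases n with
    | zero => simp [pvMap]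
    | succ m =>
      have := ih (i + 1) m (by simpa using hn)
      simp [pvMap, this, add_assoc, add_comm (1 : Int)]

-- A's inner loop over the rows sets position n to the image of its value
theorem innerA (rs : List (List Int)) (l : List Int) (n : Nat) (hn : n < l.length) :
    rs.foldl (fun pc row =>
        if PySem.List.pyGetD pc (n : Int) 0 ∈ row then
          if PySem.List.pyGetD pc (n : Int) 0 = PySem.List.pyGetD row 0 0 then
            PySem.List.pySetD pc (n : Int) (PySem.List.pyGetD row 1 0)
          else
            PySem.List.pySetD pc (n : Int) (PySem.List.pyGetD row 0 0)
        else pc) l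
      = l.set n (pvImg rs (l[n]'hn)) := by
  induction rs generalizing l with
  | nil =>
    simp [pvImg, List.foldl_nil, List.set_getElem_self]
  | cons r rs ih =>
    have hget : PySem.List.pyGetD l (n : Int) 0 = l[n]'hn := by
      simp [PySem.List.pyGetD_natCast, hn]
    have hstep : (if PySem.List.pyGetD l (n : Int) 0 ∈ r then
          if PySem.List.pyGetD l (n : Int) 0 = PySem.List.pyGetD r 0 0 then
            PySem.List.pySetD l (n : Int) (PySem.List.pyGetD r 1 0)
          else
            PySem.List.pySetD l (n : Int) (PySem.List.pyGetD r 0 0)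
        else l) = l.set n (pvStep (l[n]'hn) r) := by
      rw [hget]
      unfold pvStep
      split_ifs with h1 h2 <;>
        simp [PySem.List.pySetD_natCast, List.set_getElem_self]
    rw [List.foldl_cons, hstep,
      ih (l.set n (pvStep (l[n]'hn) r)) (by simpa using hn)]
    simp [pvImg, List.set_set]

-- innerA in the pyRange-over-row-indices form used by the port
theorem innerA' (lm : List (List Int)) (l : List Int) (n : Nat) (hn : n < l.length) :
    (PySem.List.pyRange 0 (lm.length : Int) 1).foldl (fun pc j =>
        let row := PySem.List.pyGetD lm j []
        if PySem.List.pyGetD pc (n : Int) 0 ∈ row then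
          if PySem.List.pyGetD pc (n : Int) 0 = PySem.List.pyGetD row 0 0 then
            PySem.List.pySetD pc (n : Int) (PySem.List.pyGetD row 1 0)
          else
            PySem.List.pySetD pc (n : Int) (PySem.List.pyGetD row 0 0)
        else pc) l
      = l.set n (pvImg lm (l[n]'hn)) :=
  (PySem.List.foldl_pyRange_zero_pyGetD' lm ([] : List Int)
      (fun pc row =>
        if PySem.List.pyGetD pc (n : Int) 0 ∈ row then
          if PySem.List.pyGetD pc (n : Int) 0 = PySem.List.pyGetD row 0 0 then
            PySem.List.pySetD pc (n : Int) (PySem.List.pyGetD row 1 0)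
          else
            PySem.List.pySetD pc (n : Int) (PySem.List.pyGetD row 0 0)
        else pc) l).trans
    (innerA lm l n hn)

-- A's outer loop from position k onward
theorem outerA (pi pf : Int) (lm : List (List Int)) :
    ∀ (d k : Nat) (l : List Int), l.length - k = d →
    (PySem.List.pyRange (k : Int) (l.length : Int) 1).foldl (fun pc i =>
      if i < pi ∨ i > pf then
        (PySem.List.pyRange 0 (lm.length : Int) 1).foldl (fun pc j =>
          let row := PySem.List.pyGetD lm j []
          if PySem.List.pyGetD pc i 0 ∈ row then
            if PySem.List.pyGetD pc i 0 = PySem.List.pyGetD row 0 0 then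
              PySem.List.pySetD pc i (PySem.List.pyGetD row 1 0)
            else
              PySem.List.pySetD pc i (PySem.List.pyGetD row 0 0)
          else pc) pc
      else pc) l
    = l.mapIdx (fun m v => if k ≤ m ∧ ((m : Int) < pi ∨ pf < (m : Int)) then pvImg lm v else v) := by
  intro d
  induction d with
  | zero =>
    intro k l hlen
    rw [show PySem.List.pyRange (k : Int) (l.length : Int) 1 = [] from
      PySem.List.pyRange_one_eq_nil (by exact_mod_cast (by omega : l.length ≤ k))]
    simp only [List.foldl_nil]
    refine (List.ext_getElem (by simp) ?_).symm
    intro m h1 h2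
    have hm : ¬ k ≤ m := by simp at h2; omega
    simp [List.getElem_mapIdx, hm]
  | succ d ih =>
    intro k l hlen
    have hk : k < l.length := by omega
    rw [show PySem.List.pyRange (k : Int) (l.length : Int) 1
        = (k : Int) :: PySem.List.pyRange ((k : Int) + 1) (l.length : Int) 1 from
      PySem.List.pyRange_one_cons (by exact_mod_cast hk), List.foldl_cons]
    by_cases hcond : (k : Int) < pi ∨ (k : Int) > pf
    · rw [if_pos hcond, innerA' lm l k hk]
      have hlen' : (l.set k (pvImg lm (l[k]'hk))).length - (k + 1) = d := by
        simp; omega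
      have := ih (k + 1) (l.set k (pvImg lm (l[k]'hk))) hlen'
      simp only [List.length_set] at this
      rw [show ((k : Int) + 1) = ((k + 1 : Nat) : Int) by push_cast; ring, this]
      refine List.ext_getElem (by simp) ?_
      intro m h1 h2
      simp only [List.getElem_mapIdx, List.getElem_set]
      by_cases hmk : m = k
      · subst hmk
        simp [hcond, pvImg]
      · have h1' : m < l.length := by simpa using h1
        have hne : m ≠ k := hmk
        have hiff : (k + 1 ≤ m) ↔ (k ≤ m) := by omega
        simp only [hiff, if_neg (show ¬ k = m from fun h => hne h.symm)]
    · rw [if_neg hcond]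
      have := ih (k + 1) l (by omega)
      rw [show ((k : Int) + 1) = ((k + 1 : Nat) : Int) by push_cast; ring, this]
      refine List.ext_getElem (by simp) ?_
      intro m h1 h2
      simp only [List.getElem_mapIdx]
      by_cases hmk : m = k
      · have hf : ¬ ((m : Int) < pi ∨ pf < (m : Int)) := by rw [hmk]; exact hcond
        have hg : ¬ (k + 1 ≤ m) := by omega
        simp [hf, hg]
      · have hne : m ≠ k := hmk
        have hiff : (k + 1 ≤ m) ↔ (k ≤ m) := by omega
        simp only [hiff]

-- appending loop building the (element, image) pairs of one row
theorem newsL (row : List Int) (g : Int → Int) :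
    row.foldl (fun (news : List (Int × Int)) e => news ++ [(e, g e)]) []
      = row.map (fun e => (e, g e)) := by
  have h : ∀ (r : List Int) (acc : List (Int × Int)),
      r.foldl (fun (news : List (Int × Int)) e => news ++ [(e, g e)]) acc
        = acc ++ r.map (fun e => (e, g e)) := by
    intro r
    induction r with
    | nil => intro acc; simp
    | cons e rest ih => intro acc; simp [ih]
  simpa using h row []

-- writing those pairs into the dict: lookup afterwards
theorem insL (row : List Int) (g : Int → Int) (D : PySem.Dict Int Int) (v d0 : Int) :
    ((row.map (fun e => (e, g e))).foldl
        (fun (m : PySem.Dict Int Int) p => m.insert p.1 p.2) D).getD v d0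
      = if v ∈ row then g v else D.getD v d0 := by
  induction row generalizing D with
  | nil => simp
  | cons e rest ih =>
    simp only [List.map_cons, List.foldl_cons, ih]
    by_cases hv : v ∈ rest
    · simp [hv]
    · by_cases he : v = e
      · subst he
        simp [hv, PySem.Dict.getD_insert_self]
      · rw [PySem.Dict.getD_insert]
        simp [hv, he, List.mem_cons]

-- the composed dict built by B's backward pass looks up to the full image
theorem buildL (lm : List (List Int)) (v : Int) :
    ((lm.reverse.foldl (fun (mapping : PySem.Dict Int Int) row =>
        let news := row.foldl (fun (news : List (Int × Int)) e =>
          let t := if e = PySem.List.pyGetD row 0 0 then PySem.List.pyGetD row 1 0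
                   else PySem.List.pyGetD row 0 0
          news ++ [(e, mapping.getD t t)]) []
        news.foldl (fun (m : PySem.Dict Int Int) p => m.insert p.1 p.2) mapping)
      PySem.Dict.empty).getD v v) = pvImg lm v := by
  induction lm generalizing v with
  | nil =>
    simp only [List.reverse_nil, List.foldl_nil]
    rw [PySem.Dict.getD_empty]
    rfl
  | cons r rest ih =>
    rw [List.reverse_cons, List.foldl_append, List.foldl_cons, List.foldl_nil]
    dsimp only
    rw [newsL r (fun e => _ ), insL]
    by_cases hv : v ∈ r
    · rw [if_pos hv, ih]
      have h1 : pvStep v r = (if v = PySem.List.pyGetD r 0 0 then PySem.List.pyGetD r 1 0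
          else PySem.List.pyGetD r 0 0) := by simp [pvStep, hv]
      rw [← h1]
      rfl
    · rw [if_neg hv, ih]
      have h1 : pvStep v r = v := by simp [pvStep, hv]
      rw [show pvImg (r :: rest) v = pvImg rest (pvStep v r) from rfl, h1]

-- B's comprehension over enumerate equals pvMap
theorem mapL (pi pf : Int) (lm : List (List Int)) (M : PySem.Dict Int Int)
    (hM : ∀ v, M.getD v v = pvImg lm v) :
    ∀ (pc : List Int) (s : Int),
    (PySem.List.enumerate pc s).map (fun p =>
        if pi ≤ p.1 ∧ p.1 ≤ pf then p.2 else M.getD p.2 p.2)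
      = pvMap pi pf lm pc s := by
  intro pc
  induction pc with
  | nil => intro s; simp [PySem.List.enumerate_nil, pvMap]
  | cons v vs ih =>
    intro s
    rw [PySem.List.enumerate_cons, List.map_cons, ih (s + 1)]
    by_cases h : pi ≤ s ∧ s ≤ pf
    · have hc : ¬ (s < pi ∨ pf < s) := by omega
      simp [pvMap, h, hc]
    · have hc : (s < pi ∨ pf < s) := by omega
      simp [pvMap, h, hc, hM]

-- ===== VERDICT (by name: the statement is the Claim_ definition above) =====
theorem mapear_spec : Claim_equal_mapear := by
  intro pc lm pi pf _ _
  unfold Spec_mapear mapear mapear_alt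
  have hA := outerA pi pf lm pc.length 0 pc (by omega)
  simp only [Nat.cast_zero, Nat.zero_le, true_and] at hA
  rw [hA]
  rw [show (PySem.List.enumerate pc 0).map _ = pvMap pi pf lm pc 0 from
    mapL pi pf lm _ (fun v => buildL lm v) pc 0]
  refine List.ext_getElem (by simp [pvMap_length]) ?_
  intro m h1 h2
  rw [List.getElem_mapIdx, pvMap_getElem pi pf lm pc 0 m (by simpa [pvMap_length] using h2)]
  simp
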